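-- pv_equiv track=rewrite | github.com/DylanWuPan/Wordle-AI | main.py | letterDistribution
-- ===== SOURCE A (Python) =====
-- import string
-- import copy
--
-- def findMax(distribution):
--     max = float("-inf")
--     maxLetter = ""
--     for letter in distribution:
--         if distribution[letter] > max:
--             max = distribution[letter]
--             maxLetter = letter
--     return maxLetter, max
--
-- def sortDistribution(distribution):
--     sorted = dict()
--     distributionCopy = copy.deepcopy(distribution)
--     for i in range(26):
--         max = findMax(distributionCopy)
--         sorted[max[0]] = max[1]
--         distributionCopy.pop(max[0])
--     return sorted
--
-- def letterDistribution(wordlist):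
--     distribution = dict()
--     alphabet = string.ascii_lowercase
--     for letter in alphabet:
--         distribution[letter] = 0
--     for word in wordlist:
--         for letter in word:
--             distribution[letter] += 1
--     return sortDistribution(distribution)
-- ===== SOURCE B (Python) =====
-- import string
--
-- def letterDistribution(wordlist):
--     distribution = {letter: 0 for letter in string.ascii_lowercase}
--     for word in wordlist:
--         for letter in word:
--             distribution[letter] += 1
--     return dict(sorted(distribution.items(), key=lambda kv: kv[1], reverse=True))
-- ===== Notes on version B (the rewrite author's own statement) =====
-- stated objective: idiomatic
-- what changed: Replaces the hand-written selection sort (26 rounds of findMax over a shrinking dict copy) with a single builtin stable sorted(items, key=count, reverse=True), whose stability reproduces the a-z tie order.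
import Mathlib
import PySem

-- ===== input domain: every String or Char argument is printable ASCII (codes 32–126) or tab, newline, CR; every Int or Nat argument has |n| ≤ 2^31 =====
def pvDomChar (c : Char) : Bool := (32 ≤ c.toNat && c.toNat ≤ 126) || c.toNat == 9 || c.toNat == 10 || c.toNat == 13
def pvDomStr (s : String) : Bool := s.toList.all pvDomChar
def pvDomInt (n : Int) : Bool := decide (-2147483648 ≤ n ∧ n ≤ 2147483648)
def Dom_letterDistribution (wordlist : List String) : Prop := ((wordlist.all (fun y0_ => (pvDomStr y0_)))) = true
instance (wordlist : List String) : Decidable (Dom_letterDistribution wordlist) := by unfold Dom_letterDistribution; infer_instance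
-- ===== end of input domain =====

-- B replaces A's 26-round selection sort (findMax + pop on a dict copy) with one builtin stable
-- descending sort of the items; objective: idiomatic.

-- ===== PORT A =====
-- string.ascii_lowercase, iterated by Python as its 26 one-character strings (exact).
def pyAlphabet : List String := "abcdefghijklmnopqrstuvwxyz".toList.map (fun c => String.ofList [c])

-- Both Pythons count with the same two loops: distribution = {letter: 0 for letter in a-z} (A writes
-- the first as an explicit loop), then 'for word in wordlist: for letter in word:
-- distribution[letter] += 1'.  'distribution[letter] += 1' raises KeyError when letter is not a-z:
-- exactly those inputs are excluded by Pre_; on Pre_ the key is present and d.modify is exact.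
def countLetters (wordlist : List String) : PySem.Dict String Int :=
  let d0 := pyAlphabet.foldl (fun d letter => d.insert letter (0 : Int)) PySem.Dict.empty
  wordlist.foldl (fun d w => w.toList.foldl (fun d c => d.modify (String.ofList [c]) 0 (· + 1)) d) d0

-- 'for letter in distribution: if distribution[letter] > max' = fold over the items in insertion
-- order; max = float("-inf") is modelled as none (any int compares greater than none), exact here.
def findMax (d : PySem.Dict String Int) : String × Option Int :=
  d.items.foldl
    (fun st kv =>
      if (match st.2 with | none => true | some m => decide (m < kv.2)) then (kv.1, some kv.2) else st)
    ("", none)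

-- deepcopy of an int-valued dict is a value copy (no-op here); .pop(k) = erase (the popped value is
-- discarded; every call reached from letterDistribution pops a present key).  max[1] is 'some'
-- whenever the dict is nonempty, which holds on every reached iteration; .getD 0 is unreachable.
def sortDistribution (d : PySem.Dict String Int) : PySem.Dict String Int :=
  ((PySem.List.pyRange 0 26 1).foldl
    (fun (st : PySem.Dict String Int × PySem.Dict String Int) _ =>
      let mx := findMax st.2
      (st.1.insert mx.1 (mx.2.getD 0), st.2.erase mx.1))
    (PySem.Dict.empty, d)).1

def letterDistribution (wordlist : List String) : List (String × Int) :=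
  (sortDistribution (countLetters wordlist)).items

-- ===== PORT B =====
-- dict(sorted(distribution.items(), key=lambda kv: kv[1], reverse=True)); the counting phase is the
-- same two loops as in A (countLetters above).
def letterDistribution_alt (wordlist : List String) : List (String × Int) :=
  (PySem.Dict.ofList (PySem.List.sorted (countLetters wordlist).items (fun kv => kv.2) true)).items

-- ===== PRECONDITION & SPEC =====
-- Pre_ excludes exactly the inputs containing a character outside a-z, on which A (and B) raise
-- KeyError in the counting loop.
def Pre_letterDistribution (wordlist : List String) : Prop :=
  (wordlist.all (fun w => w.toList.all
    (fun c => "abcdefghijklmnopqrstuvwxyz".toList.contains c))) = true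
instance (wordlist : List String) : Decidable (Pre_letterDistribution wordlist) := by
  unfold Pre_letterDistribution; infer_instance

def pvWitness_letterDistribution : List String := ["hello", "world", ""]

def Spec_letterDistribution (wordlist : List String) (out : List (String × Int)) : Prop := out = letterDistribution_alt wordlist
instance (wordlist : List String) (out : List (String × Int)) : Decidable (Spec_letterDistribution wordlist out) := by unfold Spec_letterDistribution; infer_instance

-- ===== CLAIM (what is proved, stated in full; the proofs are below) =====
def Claim_equal_letterDistribution : Prop := ∀ (wordlist : List String), Dom_letterDistribution wordlist → Pre_letterDistribution wordlist → Spec_letterDistribution wordlist (letterDistribution wordlist)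

-- ===== LEMMAS AND PROOFS =====

-- findMax's fold, on a raw items list
def fmaxL (l : List (String × Int)) : String × Option Int :=
  l.foldl
    (fun st kv =>
      if (match st.2 with | none => true | some m => decide (m < kv.2)) then (kv.1, some kv.2) else st)
    ("", none)

-- one selection round at the items-list level: emit the first max, drop its key (Dict.erase's filter)
def selExtract : Nat → List (String × Int) → List (String × Int)
  | 0, _ => []
  | n + 1, l =>
      let mx := fmaxL l
      (mx.1, mx.2.getD 0) :: selExtract n (l.filter (fun p => !(p.1 == mx.1)))

-- Stable descending sort emits the FIRST maximal element first, exactly as A's strict-'>' findMax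
-- picks it, and the rest is the stable sort of the list with that element removed.
lemma sortedRev_decomp (l : List (String × Int)) (h : l ≠ []) :
    ∃ k v, fmaxL l = (k, some v) ∧ (k, v) ∈ l ∧ (∀ p ∈ l, p.2 ≤ v) ∧
      PySem.List.sorted l (fun kv => kv.2) true
        = (k, v) :: PySem.List.sorted (l.erase (k, v)) (fun kv => kv.2) true := by
  induction l using List.reverseRecOn with
  | nil => exact absurd rfl h
  | append_singleton ys x ih =>
    obtain ⟨xk, xv⟩ := x
    rcases eq_or_ne ys [] with rfl | hys
    · refine ⟨xk, xv, rfl, by simp, by simp, ?_⟩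
      simp [PySem.List.sorted, PySem.List.insertBy]
    · obtain ⟨k, v, hfm, hmem, hmax, hS⟩ := ih hys
      have hfm' : fmaxL (ys ++ [(xk, xv)]) =
          (if v < xv then ((xk, some xv) : String × Option Int) else (k, some v)) := by
        rw [fmaxL, List.foldl_concat, ← fmaxL, hfm]
        by_cases hlt : v < xv <;> simp [hlt]
      have hSapp : ∀ (t : List (String × Int)),
          PySem.List.sorted (t ++ [(xk, xv)]) (fun kv => kv.2) true =
            PySem.List.insertBy (fun a b => decide (b.2 < a.2)) (xk, xv)
              (PySem.List.sorted t (fun kv => kv.2) true) := by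
        intro t
        rw [PySem.List.sorted_rev_eq_foldl_insertBy, List.foldl_concat,
          ← PySem.List.sorted_rev_eq_foldl_insertBy]
      by_cases hlt : v < xv
      · have hnotmem : (xk, xv) ∉ ys := fun hx => absurd (hmax _ hx) (by simpa using hlt)
        refine ⟨xk, xv, by simp [hfm', hlt], by simp, ?_, ?_⟩
        · intro p hp
          rcases List.mem_append.1 hp with hp | hp
          · exact le_of_lt (lt_of_le_of_lt (hmax p hp) hlt)
          · simp at hp; simp [hp]
        · rw [hSapp, hS, List.erase_append_right _ hnotmem]
          simp [PySem.List.insertBy, hlt, hS]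
      · refine ⟨k, v, by simp [hfm', hlt], List.mem_append_left _ hmem, ?_, ?_⟩
        · intro p hp
          rcases List.mem_append.1 hp with hp | hp
          · exact hmax p hp
          · simp at hp; simp [hp]; omega
        · rw [hSapp, hS, List.erase_append_left _ hmem, hSapp]
          have : ¬ (v : Int) < xv := hlt
          simp [PySem.List.insertBy, this]

-- with distinct keys, Dict.erase's filter-by-key removes exactly the found pair
lemma filter_key_eq_erase (l : List (String × Int)) (k : String) (v : Int)
    (hnd : (l.map Prod.fst).Nodup) (hm : (k, v) ∈ l) :
    l.filter (fun p => !(p.1 == k)) = l.erase (k, v) := by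
  induction l with
  | nil => simp at hm
  | cons p t ih =>
    simp only [List.map_cons, List.nodup_cons] at hnd
    by_cases hk : p.1 = k
    · have hp : p = (k, v) := by
        rcases List.mem_cons.1 hm with h | h
        · exact h.symm
        · exact absurd (by simpa [hk] using List.mem_map_of_mem (f := Prod.fst) h) (by simp [hk] at hnd ⊢; exact hnd.1)
      subst hp
      rw [List.erase_cons_head _ _]
      have h1 : ((k, v) :: t).filter (fun p => !(p.1 == k)) = t.filter (fun p => !(p.1 == k)) := by simp
      rw [h1]
      exact List.filter_eq_self.2 (fun q hq => by
        have : q.1 ≠ k := fun he => hnd.1 (by simpa [hk, ← he] using List.mem_map_of_mem (f := Prod.fst) hq)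
        simp [this])
    · have hm' : (k, v) ∈ t := by
        rcases List.mem_cons.1 hm with h | h
        · exact absurd (congrArg Prod.fst h.symm) hk
        · exact h
      have hpe : p ≠ (k, v) := fun he => hk (congrArg Prod.fst he)
      rw [List.erase_cons_tail (by simpa using hpe), List.filter_cons_of_pos (by simp [hk])]
      rw [ih hnd.2 hm']

-- running the selection for exactly length-many rounds IS the stable descending sort
lemma selExtract_eq_sorted (n : Nat) (l : List (String × Int))
    (hn : n = l.length) (hnd : (l.map Prod.fst).Nodup) :
    selExtract n l = PySem.List.sorted l (fun kv => kv.2) true := by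
  induction n generalizing l with
  | zero =>
    have : l = [] := List.length_eq_zero_iff.1 hn.symm
    subst this; rfl
  | succ n ih =>
    have hne : l ≠ [] := by intro h; subst h; simp at hn
    obtain ⟨k, v, hfm, hmem, _, hS⟩ := sortedRev_decomp l hne
    have hfe := filter_key_eq_erase l k v hnd hmem
    have hnd' : ((l.erase (k, v)).map Prod.fst).Nodup :=
      ((List.erase_sublist (a := (k, v)) (l := l)).map Prod.fst).nodup hnd
    have hlen : n = (l.erase (k, v)).length := by
      rw [List.length_erase_of_mem hmem]; omega
    rw [hS, selExtract]
    simp only [hfm, hfe]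
    rw [ih _ hlen hnd']; rfl

-- A's range-loop over (sorted-so-far, remaining dict) appends selExtract of the remaining items
lemma loop_items (is : List Int) (acc d : PySem.Dict String Int)
    (hnd : d.keys.Nodup) (hlen : is.length = d.items.length)
    (hdisj : ∀ k, acc.contains k = true → d.contains k = false) :
    (is.foldl
      (fun (st : PySem.Dict String Int × PySem.Dict String Int) _ =>
        let mx := findMax st.2
        (st.1.insert mx.1 (mx.2.getD 0), st.2.erase mx.1))
      (acc, d)).1.items = acc.items ++ selExtract is.length d.items := by
  induction is generalizing acc d with
  | nil => simp [selExtract]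
  | cons i is ih =>
    have hne : d.items ≠ [] := by
      intro h; rw [h] at hlen; simp at hlen
    obtain ⟨k, v, hfm, hmem, _, _⟩ := sortedRev_decomp d.items hne
    have hfm' : findMax d = (k, some v) := hfm
    have hkmem : k ∈ d.keys := PySem.Dict.mem_keys_of_mem_items d hmem
    have hknacc : acc.contains k = false := by
      cases hc : acc.contains k with
      | false => rfl
      | true =>
        have := hdisj k hc
        rw [(PySem.Dict.contains_iff_mem_keys d k).2 hkmem] at this
        exact absurd this (by simp)
    have hitems : (d.erase k).items = d.items.filter (fun p => !(p.1 == k)) := rfl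
    have hsub : (d.erase k).items.Sublist d.items := by
      rw [hitems]; exact List.filter_sublist
    have hnd' : (d.erase k).keys.Nodup := (hsub.map Prod.fst).nodup hnd
    have hfe : d.items.filter (fun p => !(p.1 == k)) = d.items.erase (k, v) :=
      filter_key_eq_erase d.items k v hnd hmem
    have hlen' : is.length = (d.erase k).items.length := by
      rw [hitems, hfe, List.length_erase_of_mem hmem]
      simp only [List.length_cons] at hlen; omega
    have hmono : ∀ k', (d.erase k).contains k' = true → d.contains k' = true := by
      intro k' h
      exact (PySem.Dict.contains_iff_mem_keys d k').2
        ((hsub.map Prod.fst).subset ((PySem.Dict.contains_iff_mem_keys _ k').1 h))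
    have hck : (d.erase k).contains k = false := by
      cases hc : (d.erase k).contains k with
      | false => rfl
      | true =>
        have hk' : k ∈ (d.erase k).items.map Prod.fst := (PySem.Dict.contains_iff_mem_keys _ k).1 hc
        obtain ⟨p, hp, hpk⟩ := List.mem_map.1 hk'
        rw [hitems] at hp
        have := List.of_mem_filter hp
        rw [hpk] at this
        simp at this
    have hdisj' : ∀ k', (acc.insert k ((some v).getD 0 : Int)).contains k' = true →
        (d.erase k).contains k' = false := by
      intro k' hk'
      rw [PySem.Dict.contains_insert] at hk'
      rcases Bool.or_eq_true_iff.1 hk' with h | h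
      · have : k' = k := by simpa using h
        rw [this]; exact hck
      · cases hc : (d.erase k).contains k' with
        | false => rfl
        | true =>
          have := hdisj k' h
          rw [hmono k' hc] at this
          exact absurd this (by simp)
    have step : (let mx := findMax (acc, d).2
        ((acc, d).1.insert mx.1 (mx.2.getD 0), (acc, d).2.erase mx.1))
        = (acc.insert k ((some v).getD 0 : Int), d.erase k) := by
      rw [show findMax (acc, d).2 = (k, some v) from hfm']
    simp only [List.foldl_cons]
    rw [step, ih _ _ hnd' hlen' hdisj']
    rw [PySem.Dict.items_insert_of_not_contains acc _ hknacc]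
    show _ = acc.items ++ selExtract (is.length + 1) d.items
    rw [selExtract]
    simp only [hfm, hitems]
    simp

-- updating a set with elements it already holds is the identity
lemma set_update_self (s : PySem.Set String) (xs : List String) (h : ∀ x ∈ xs, x ∈ s) :
    PySem.Set.update s xs = s := by
  rw [PySem.Set.update_eq_append_filter]
  have : (PySem.Set.ofList xs).filter (fun y => !(PySem.Set.contains s y)) = [] := by
    apply List.filter_eq_nil_iff.2
    intro y hy
    have hys : y ∈ s := h y ((PySem.Set.mem_ofList xs y).1 hy)
    simpa using hys
  rw [this, List.append_nil]

lemma nodup_pyAlphabet : pyAlphabet.Nodup := by decide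

-- under Pre_, the counting loops never add a key: the counted dict's keys stay a-z in order
lemma keys_countLetters (wordlist : List String) (hpre : Pre_letterDistribution wordlist) :
    (countLetters wordlist).keys = pyAlphabet := by
  have hpre' : ∀ w ∈ wordlist, ∀ c ∈ w.toList, c ∈ "abcdefghijklmnopqrstuvwxyz".toList := by
    simpa [Pre_letterDistribution, List.all_eq_true] using hpre
  clear hpre
  unfold countLetters
  have h0 : (pyAlphabet.foldl (fun d letter => d.insert letter (0 : Int)) PySem.Dict.empty).keys
      = pyAlphabet := by
    rw [PySem.Dict.keys_foldl_insert pyAlphabet (fun _ _ => (0 : Int)) PySem.Dict.empty]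
    rw [show (PySem.Dict.empty : PySem.Dict String Int).keys = [] from rfl]
    rw [PySem.Set.update_nil_left, PySem.Set.ofList_eq_self_of_nodup _ nodup_pyAlphabet]
  have gen : ∀ (ws : List String) (d : PySem.Dict String Int), d.keys = pyAlphabet →
      (∀ w ∈ ws, ∀ c ∈ w.toList, c ∈ "abcdefghijklmnopqrstuvwxyz".toList) →
      (ws.foldl (fun d w => w.toList.foldl
        (fun d c => d.modify (String.ofList [c]) 0 (· + 1)) d) d).keys = pyAlphabet := by
    intro ws
    induction ws with
    | nil => intro d hd _; simpa using hd
    | cons w ws ih =>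
      intro d hd hpre
      rw [List.foldl_cons]
      apply ih
      · rw [PySem.Dict.keys_foldl_modify_key w.toList (fun c => String.ofList [c]) 0
          (fun _ _ => (· + 1)) d, hd]
        apply set_update_self
        intro x hx
        obtain ⟨c, hc, rfl⟩ := List.mem_map.1 hx
        exact List.mem_map_of_mem (hpre w (by simp) c hc)
      · intro w' hw' c hc
        exact hpre w' (List.mem_cons_of_mem _ hw') c hc
  exact gen wordlist _ h0 hpre'

-- dict() of a pair list with distinct keys keeps the list as its items
lemma ofList_items_of_nodup_keys (l : List (String × Int)) (hnd : (l.map Prod.fst).Nodup) :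
    (PySem.Dict.ofList l).items = l := by
  show ((PySem.Dict.empty : PySem.Dict String Int).update l).items = l
  rw [PySem.Dict.update]
  rw [PySem.Dict.items_foldl_insert_fresh l Prod.fst Prod.snd PySem.Dict.empty
    (fun a _ => PySem.Dict.contains_empty a.1) hnd]
  simp [PySem.Dict.empty]

-- ===== VERDICT (by name: the statement is the Claim_ definition above) =====
theorem letterDistribution_spec : Claim_equal_letterDistribution := by
  intro wl _ hpre
  unfold Spec_letterDistribution letterDistribution letterDistribution_alt sortDistribution
  have hkeys := keys_countLetters wl hpre
  have hknd : (countLetters wl).keys.Nodup := by rw [hkeys]; exact nodup_pyAlphabet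
  have hlen26 : (countLetters wl).items.length = 26 := by
    have h : (countLetters wl).keys.length = 26 := by rw [hkeys]; decide
    simpa [PySem.Dict.keys] using h
  have hndf : ((countLetters wl).items.map Prod.fst).Nodup := hknd
  rw [loop_items _ _ _ hknd (by rw [hlen26]; decide)
    (fun k h => by rw [PySem.Dict.contains_empty] at h; exact absurd h (by simp))]
  rw [selExtract_eq_sorted _ _ (by rw [hlen26]; decide) hndf]
  have hsortnd : ((PySem.List.sorted (countLetters wl).items (fun kv => kv.2) true).map
      Prod.fst).Nodup := by
    have hperm : ((PySem.List.sorted (countLetters wl).items (fun kv => kv.2) true).map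
        Prod.fst).Perm (countLetters wl).keys :=
      (PySem.List.sorted_perm _ _ _).map Prod.fst
    exact hperm.nodup_iff.2 hknd
  rw [ofList_items_of_nodup_keys _ hsortnd]
  simp [PySem.Dict.empty]
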